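-- pv_equiv track=rewrite | github.com/Foureyed-Jimmy/Algo_proj2 | Solve.py | solve
-- ===== SOURCE A (Python) =====
-- def interpret(value, statement):
--     if statement < 0:
--         return not value
--     return value
--
-- def get(d, value):
--     b = d[abs(value)]["set"]
--     if value < 0:
--         return not b
--     return b
--
-- def genDict(size):
--     parent = dict.fromkeys(range(1,size + 1), None)
--     for key in parent.keys(): #{1:{True:2,False:1}, 2:{True:2, False:1}}
--         parent[key] = dict.fromkeys([True, False, "set"], 0)
--     return parent
--
-- def solve(vals):
--     header = vals[0]
--     vals = vals[1:]
--     pos_combs = [[True, True], [True, False], [False, True], [False, False]]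
--     d = genDict(header[1])
--     for i in range(len(vals)):
--         for j in range(len(pos_combs)):
--             if interpret(pos_combs[j][0], vals[i][0]) or interpret(pos_combs[j][1], vals[i][1]):
--                 d[abs(vals[i][0])][pos_combs[j][0]] += 1
--                 d[abs(vals[i][1])][pos_combs[j][1]] += 1
--     for key in d.keys():
--         item  = d[key]
--         item["set"] = item[True] >= item[False]
--     count = 0
--
--     for item in vals:
--         value = get(d, item[0]) or get(d, item[1])
--         if value:
--             count += 1
--     sol_arr = [(1 if d[key]["set"] else 0) for key in d.keys()]
--     return (sol_arr, count)
-- ===== SOURCE B (Python) =====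
-- def solve(vals):
--     header = vals[0]
--     clauses = vals[1:]
--     tally = dict.fromkeys(range(1, header[1] + 1), 0)
--     for c in clauses:
--         for lit in (c[0], c[1]):
--             tally[abs(lit)] += 1 if lit >= 0 else -1
--     assign = {v: t >= 0 for v, t in tally.items()}
--     count = 0
--     for c in clauses:
--         a, b = c[0], c[1]
--         sa = (not assign[abs(a)]) if a < 0 else assign[abs(a)]
--         sb = (not assign[abs(b)]) if b < 0 else assign[abs(b)]
--         if sa or sb:
--             count += 1
--     return ([1 if assign[v] else 0 for v in assign], count)
-- ===== Notes on version B (the rewrite author's own statement) =====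
-- stated objective: simpler
-- what changed: B replaces A's quadruple-nested voting loop over the four boolean combinations (two dict counters per variable plus a comparison pass) by a single signed tally per variable (+1 per positive, -1 per negative literal occurrence), setting a variable True iff its tally is >= 0; the satisfied-clause counting pass is kept.
import Mathlib
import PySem

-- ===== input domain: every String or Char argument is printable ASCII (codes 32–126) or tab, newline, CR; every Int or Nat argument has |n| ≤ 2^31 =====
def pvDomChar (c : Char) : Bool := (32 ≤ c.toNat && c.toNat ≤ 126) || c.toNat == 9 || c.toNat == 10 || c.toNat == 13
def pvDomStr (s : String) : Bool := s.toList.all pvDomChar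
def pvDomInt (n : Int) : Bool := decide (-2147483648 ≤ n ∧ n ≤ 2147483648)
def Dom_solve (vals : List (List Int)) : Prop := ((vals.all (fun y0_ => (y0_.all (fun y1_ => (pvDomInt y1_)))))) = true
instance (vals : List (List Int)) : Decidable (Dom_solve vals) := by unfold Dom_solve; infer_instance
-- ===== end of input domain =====

-- B replaces A's 4-combination voting loop by a single signed tally (+1 per positive, -1 per negative literal)
-- per variable, setting a variable True iff its tally is ≥ 0; same return value, one pass instead of four.

-- ===== PORT A =====
-- inner dict {True: _, False: _, "set": _} of A is ported as a 3-field record (Int, Int, Bool)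
structure ARec where
  t : Int
  f : Int
  s : Bool
deriving DecidableEq, Repr

def dfR : ARec := ⟨0, 0, false⟩

def interpretA (value : Bool) (statement : Int) : Bool :=
  if statement < 0 then !value else value

def getA (d : PySem.Dict Int ARec) (value : Int) : Bool :=
  -- d[abs(value)]["set"]; a KeyError is excluded by Pre_solve, so getD is exact there
  let b := (d.getD |value| dfR).s
  if value < 0 then !b else b

def genDictA (size : Int) : PySem.Dict Int ARec :=
  (PySem.List.pyRange 1 (size + 1)).foldl (fun d k => d.insert k dfR) PySem.Dict.empty

-- pos_combs as a list of pairs (each element is a 2-list in Python, indexed only at [0] and [1])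
def posCombsA : List (Bool × Bool) := [(true, true), (true, false), (false, true), (false, false)]

-- d[key][x] += 1
def bumpA (x : Bool) (r : ARec) : ARec :=
  if x then { r with t := r.t + 1 } else { r with f := r.f + 1 }

def solve (vals : List (List Int)) : List Int × Int :=
  let header := PySem.List.pyGetD vals 0 []              -- vals[0]; IndexError excluded by Pre_solve
  let clauses := PySem.List.slice vals (some 1) none     -- vals = vals[1:]
  let d0 := genDictA (PySem.List.pyGetD header 1 0)      -- header[1]; IndexError excluded by Pre_solve
  let d1 := (PySem.List.pyRange 0 (PySem.List.len clauses)).foldl (fun d i =>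
      let ci := PySem.List.pyGetD clauses i []
      let a := PySem.List.pyGetD ci 0 0
      let b := PySem.List.pyGetD ci 1 0
      posCombsA.foldl (fun d cb =>
        if interpretA cb.1 a || interpretA cb.2 b then
          -- d[abs(a)][cb.1] += 1 ; d[abs(b)][cb.2] += 1 (KeyError excluded by Pre_solve)
          (d.modify |a| dfR (bumpA cb.1)).modify |b| dfR (bumpA cb.2)
        else d) d) d0
  let d2 := d1.keys.foldl (fun d key =>
      d.modify key dfR (fun r => { r with s := decide (r.f ≤ r.t) })) d1
  let count := clauses.foldl (fun c item =>
      if getA d2 (PySem.List.pyGetD item 0 0) || getA d2 (PySem.List.pyGetD item 1 0) then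
        c + 1 else c) (0 : Int)
  let solArr := d2.keys.map (fun key => if (d2.getD key dfR).s then (1 : Int) else 0)
  (solArr, count)

-- ===== PORT B =====
def sgnB (lit : Int) : Int := if 0 ≤ lit then 1 else -1

def satB (assign : PySem.Dict Int Bool) (lit : Int) : Bool :=
  if lit < 0 then !(assign.getD |lit| false) else assign.getD |lit| false

def solve_alt (vals : List (List Int)) : List Int × Int :=
  let header := PySem.List.pyGetD vals 0 []
  let clauses := PySem.List.slice vals (some 1) none
  let tally0 : PySem.Dict Int Int :=
    (PySem.List.pyRange 1 (PySem.List.pyGetD header 1 0 + 1)).foldl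
      (fun d k => d.insert k 0) PySem.Dict.empty
  let tally := clauses.foldl (fun t c =>
      let t1 := t.modify |PySem.List.pyGetD c 0 0| 0 (· + sgnB (PySem.List.pyGetD c 0 0))
      t1.modify |PySem.List.pyGetD c 1 0| 0 (· + sgnB (PySem.List.pyGetD c 1 0))) tally0
  let assign := tally.items.foldl (fun d p => d.insert p.1 (decide ((0:Int) ≤ p.2))) PySem.Dict.empty
  let count := clauses.foldl (fun c cl =>
      if satB assign (PySem.List.pyGetD cl 0 0) || satB assign (PySem.List.pyGetD cl 1 0) then
        c + 1 else c) (0 : Int)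
  (assign.items.map (fun p => if p.2 then (1 : Int) else 0), count)

-- ===== PRECONDITION & SPEC =====
-- Pre_solve admits exactly the inputs on which the Python A returns: a non-empty vals whose header has an
-- index-1 entry and whose every clause has entries at 0 and 1 with 1 ≤ |literal| ≤ header[1] (otherwise A
-- raises IndexError/KeyError).
def Pre_solve (vals : List (List Int)) : Prop :=
  vals ≠ [] ∧ 2 ≤ (vals.getD 0 []).length ∧
    ∀ c ∈ vals.tail, 2 ≤ c.length ∧
      (1 ≤ |c.getD 0 0| ∧ |c.getD 0 0| ≤ (vals.getD 0 []).getD 1 0) ∧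
      (1 ≤ |c.getD 1 0| ∧ |c.getD 1 0| ≤ (vals.getD 0 []).getD 1 0)

instance (vals : List (List Int)) : Decidable (Pre_solve vals) := by
  unfold Pre_solve; infer_instance

def pvWitness_solve : List (List Int) := [[2, 2], [1, 2], [-1, -2]]

def Spec_solve (vals : List (List Int)) (out : List Int × Int) : Prop := out = solve_alt vals
instance (vals : List (List Int)) (out : List Int × Int) : Decidable (Spec_solve vals out) := by
  unfold Spec_solve; infer_instance

-- ===== CLAIM (what is proved, stated in full; the proofs are below) =====
def Claim_equal_solve : Prop :=
  ∀ (vals : List (List Int)), Dom_solve vals → Pre_solve vals → Spec_solve vals (solve vals)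

-- ===== LEMMAS AND PROOFS =====

-- getD after a fold of constant inserts (used for both initial dicts)
lemma getD_foldl_insert_const {ν : Type} (l : List Int) (v d0 : ν) :
    ∀ (d : PySem.Dict Int ν) (k : Int),
      (l.foldl (fun d k => d.insert k v) d).getD k d0 =
        if k ∈ l then v else d.getD k d0 := by
  induction l with
  | nil => intro d k; simp
  | cons a l ih =>
    intro d k
    simp only [List.foldl_cons]
    rw [ih]
    by_cases hk : k ∈ l
    · simp [hk]
    · rw [if_neg hk, PySem.Dict.getD_insert]
      by_cases hka : k = a <;> simp [hka, hk]

-- items of a fold of constant inserts over nodup keys from the empty dict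
lemma items_foldl_insert_const {ν : Type} (l : List Int) (v : ν) (hnd : l.Nodup) :
    (l.foldl (fun d k => d.insert k v) PySem.Dict.empty).items = l.map (fun k => (k, v)) := by
  have h := PySem.Dict.items_foldl_insert_fresh l (fun x => x) (fun _ => v)
    (PySem.Dict.empty) (by intro a _; simp) (by simpa using hnd)
  simpa using h

lemma keys_modify_of_mem {ν : Type} (d : PySem.Dict Int ν) (k : Int) (d0 : ν) (g : ν → ν)
    (h : k ∈ d.keys) : (d.modify k d0 g).keys = d.keys := by
  rw [PySem.Dict.keys_modify, PySem.Dict.keys_insert_of_contains]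
  exact (PySem.Dict.contains_iff_mem_keys d k).mpr h

lemma getD_foldl_modify_of_nodup {ν : Type} (l : List Int) (g : ν → ν) (d0 : ν) :
    ∀ (d : PySem.Dict Int ν) (k : Int), l.Nodup →
      (l.foldl (fun d k => d.modify k d0 g) d).getD k d0 =
        if k ∈ l then g (d.getD k d0) else d.getD k d0 := by
  induction l with
  | nil => intro d k _; simp
  | cons a l ih =>
    intro d k hnd
    obtain ⟨ha, hl⟩ := List.nodup_cons.mp hnd
    simp only [List.foldl_cons]
    rw [ih _ _ hl, PySem.Dict.getD_modify]
    by_cases hk : k ∈ l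
    · have hka : k ≠ a := fun h => ha (h ▸ hk)
      simp [hk, hka]
    · by_cases hka : k = a <;> simp [hka, hk, ha]

-- the quantity A's voting loop tracks at one key: true-votes minus false-votes
def tfD (d : PySem.Dict Int ARec) (k : Int) : Int :=
  (d.getD k dfR).t - (d.getD k dfR).f

lemma tf_modify (d : PySem.Dict Int ARec) (x : Bool) (m k : Int) :
    tfD (d.modify m dfR (bumpA x)) k = tfD d k + (if k = m then (if x then 1 else -1) else 0) := by
  simp only [tfD, PySem.Dict.getD_modify]
  by_cases h : k = m
  · subst h; cases x <;> simp [bumpA] <;> ring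
  · simp [h]

-- A's four-combination vote over one clause changes t - f at key k by sgnB per matching slot
lemma voteA_getD (a b : Int) (d : PySem.Dict Int ARec) (k : Int) :
    tfD (posCombsA.foldl (fun d cb =>
      if interpretA cb.1 a || interpretA cb.2 b then
        (d.modify |a| dfR (bumpA cb.1)).modify |b| dfR (bumpA cb.2)
      else d) d) k =
      tfD d k + (if k = |a| then sgnB a else 0) + (if k = |b| then sgnB b else 0) := by
  by_cases ha : a < 0 <;> by_cases hb : b < 0 <;>
    simp [posCombsA, interpretA, ha, hb] <;>
    simp only [tf_modify, sgnB] <;>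
    split_ifs <;> first | omega | simp_all

lemma voteA_keys (a b : Int) (d : PySem.Dict Int ARec)
    (ha : |a| ∈ d.keys) (hb : |b| ∈ d.keys) :
    (posCombsA.foldl (fun d cb =>
      if interpretA cb.1 a || interpretA cb.2 b then
        (d.modify |a| dfR (bumpA cb.1)).modify |b| dfR (bumpA cb.2)
      else d) d).keys = d.keys := by
  have step : ∀ (d' : PySem.Dict Int ARec) (cb : Bool × Bool), |a| ∈ d'.keys → |b| ∈ d'.keys →
      (if interpretA cb.1 a || interpretA cb.2 b then
        (d'.modify |a| dfR (bumpA cb.1)).modify |b| dfR (bumpA cb.2)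
      else d').keys = d'.keys := by
    intro d' cb h1 h2
    split
    · rw [keys_modify_of_mem _ _ _ _ (by rw [keys_modify_of_mem _ _ _ _ h1]; exact h2),
        keys_modify_of_mem _ _ _ _ h1]
    · rfl
  have gen : ∀ (l : List (Bool × Bool)) (d' : PySem.Dict Int ARec),
      |a| ∈ d'.keys → |b| ∈ d'.keys →
      (l.foldl (fun d cb =>
        if interpretA cb.1 a || interpretA cb.2 b then
          (d.modify |a| dfR (bumpA cb.1)).modify |b| dfR (bumpA cb.2)
        else d) d').keys = d'.keys := by
    intro l
    induction l with
    | nil => intro d' _ _; rfl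
    | cons cb l ih =>
      intro d' h1 h2
      have hs := step d' cb h1 h2
      simp only [List.foldl_cons]
      rw [ih _ (by rw [hs]; exact h1) (by rw [hs]; exact h2), hs]
  exact gen posCombsA d ha hb

-- B's two modifies over one clause, closed form
lemma tallyStep_getD (a b : Int) (t : PySem.Dict Int Int) (k : Int) :
    (((t.modify |a| 0 (· + sgnB a)).modify |b| 0 (· + sgnB b)).getD k 0) =
      t.getD k 0 + (if k = |a| then sgnB a else 0) + (if k = |b| then sgnB b else 0) := by
  simp only [PySem.Dict.getD_modify]
  split_ifs <;> subst_vars <;> simp_all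

-- the two clause loops preserve the per-key relation t - f = tally
lemma loop_rel (cs : List (List Int)) :
    ∀ (dA : PySem.Dict Int ARec) (dB : PySem.Dict Int Int) (k : Int),
      tfD dA k = dB.getD k 0 →
      tfD (cs.foldl (fun d ci =>
        posCombsA.foldl (fun d cb =>
          if interpretA cb.1 (PySem.List.pyGetD ci 0 0) || interpretA cb.2 (PySem.List.pyGetD ci 1 0) then
            (d.modify |PySem.List.pyGetD ci 0 0| dfR (bumpA cb.1)).modify |PySem.List.pyGetD ci 1 0| dfR (bumpA cb.2)
          else d) d) dA) k =
      (cs.foldl (fun t c =>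
        (t.modify |PySem.List.pyGetD c 0 0| 0 (· + sgnB (PySem.List.pyGetD c 0 0))).modify
          |PySem.List.pyGetD c 1 0| 0 (· + sgnB (PySem.List.pyGetD c 1 0))) dB).getD k 0 := by
  induction cs with
  | nil => intro dA dB k h; exact h
  | cons c cs ih =>
    intro dA dB k h
    simp only [List.foldl_cons]
    apply ih
    rw [voteA_getD, tallyStep_getD, h]

lemma loopA_keys (cs : List (List Int)) :
    ∀ (dA : PySem.Dict Int ARec),
      (∀ c ∈ cs, |PySem.List.pyGetD c 0 0| ∈ dA.keys ∧ |PySem.List.pyGetD c 1 0| ∈ dA.keys) →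
      (cs.foldl (fun d ci =>
        posCombsA.foldl (fun d cb =>
          if interpretA cb.1 (PySem.List.pyGetD ci 0 0) || interpretA cb.2 (PySem.List.pyGetD ci 1 0) then
            (d.modify |PySem.List.pyGetD ci 0 0| dfR (bumpA cb.1)).modify |PySem.List.pyGetD ci 1 0| dfR (bumpA cb.2)
          else d) d) dA).keys = dA.keys := by
  induction cs with
  | nil => intro dA _; rfl
  | cons c cs ih =>
    intro dA hmem
    obtain ⟨h0, h1⟩ := hmem c (List.mem_cons_self ..)
    have hs := voteA_keys (PySem.List.pyGetD c 0 0) (PySem.List.pyGetD c 1 0) dA h0 h1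
    simp only [List.foldl_cons]
    rw [ih _ (by intro c' hc'; rw [hs]; exact hmem c' (List.mem_cons_of_mem _ hc')), hs]

lemma loopB_keys (cs : List (List Int)) :
    ∀ (dB : PySem.Dict Int Int),
      (∀ c ∈ cs, |PySem.List.pyGetD c 0 0| ∈ dB.keys ∧ |PySem.List.pyGetD c 1 0| ∈ dB.keys) →
      (cs.foldl (fun t c =>
        (t.modify |PySem.List.pyGetD c 0 0| 0 (· + sgnB (PySem.List.pyGetD c 0 0))).modify
          |PySem.List.pyGetD c 1 0| 0 (· + sgnB (PySem.List.pyGetD c 1 0))) dB).keys = dB.keys := by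
  induction cs with
  | nil => intro dB _; rfl
  | cons c cs ih =>
    intro dB hmem
    obtain ⟨h0, h1⟩ := hmem c (List.mem_cons_self ..)
    have hs : ((dB.modify |PySem.List.pyGetD c 0 0| 0 (· + sgnB (PySem.List.pyGetD c 0 0))).modify
        |PySem.List.pyGetD c 1 0| 0 (· + sgnB (PySem.List.pyGetD c 1 0))).keys = dB.keys := by
      rw [keys_modify_of_mem _ _ _ _ (by rw [keys_modify_of_mem _ _ _ _ h0]; exact h1),
        keys_modify_of_mem _ _ _ _ h0]
    simp only [List.foldl_cons]
    rw [ih _ (by intro c' hc'; rw [hs]; exact hmem c' (List.mem_cons_of_mem _ hc')), hs]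

-- a fold of modifies at existing keys preserves the key list
lemma keys_foldl_modify_of_mem {ν : Type} (g : ν → ν) (d0 : ν) :
    ∀ (l : List Int) (d : PySem.Dict Int ν), (∀ x ∈ l, x ∈ d.keys) →
      (l.foldl (fun d k => d.modify k d0 g) d).keys = d.keys := by
  intro l
  induction l with
  | nil => intro d _; rfl
  | cons a l ih =>
    intro d hmem
    have hs := keys_modify_of_mem d a d0 g (hmem a (List.mem_cons_self ..))
    simp only [List.foldl_cons]
    rw [ih _ (by intro x hx; rw [hs]; exact hmem x (List.mem_cons_of_mem _ hx)), hs]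

-- keys of an item list of pairs built over l are l itself
lemma map_fst_pair {β : Type} (g : Int → β) (l : List Int) :
    l.map ((fun x => x.1) ∘ fun k => (k, g k)) = l := by
  simp [Function.comp_def]

-- ===== VERDICT (by name: the statement is the Claim_ definition above) =====
theorem solve_spec : Claim_equal_solve := by
  intro vals _hdom hpre
  obtain ⟨hne, hlen, hcl⟩ := hpre
  unfold Spec_solve
  obtain ⟨h, cls, rfl⟩ : ∃ h cls, vals = h :: cls := by
    cases vals with
    | nil => exact absurd rfl hne
    | cons h cls => exact ⟨h, cls, rfl⟩
  simp only [List.getD_cons_zero, List.tail_cons] at hlen hcl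
  simp only [solve, solve_alt, PySem.List.pyGetD_zero_cons, PySem.List.slice_from_one,
    List.tail_cons]
  rw [PySem.List.foldl_pyRange_pyGetD cls ([] : List Int)
    (f := fun d ci =>
      posCombsA.foldl (fun d cb =>
        if interpretA cb.1 (PySem.List.pyGetD ci 0 0) || interpretA cb.2 (PySem.List.pyGetD ci 1 0) then
          (d.modify |PySem.List.pyGetD ci 0 0| dfR (bumpA cb.1)).modify
            |PySem.List.pyGetD ci 1 0| dfR (bumpA cb.2)
        else d) d)
    (genDictA (PySem.List.pyGetD h 1 0)) (le_refl 0)]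
  rw [Int.toNat_zero, List.drop_zero]
  set n := PySem.List.pyGetD h 1 0 with hn
  have hgets : n = h.getD 1 0 := PySem.List.pyGetD_ofNat' h 1 0
  set R := PySem.List.pyRange 1 (n + 1) with hR
  have nodupR : R.Nodup := PySem.List.nodup_pyRange_one 1 (n + 1)
  have hmem : ∀ c ∈ cls, |PySem.List.pyGetD c 0 0| ∈ R ∧ |PySem.List.pyGetD c 1 0| ∈ R := by
    intro c hc
    obtain ⟨hclen, ⟨h01, h02⟩, h11, h12⟩ := hcl c hc
    rw [PySem.List.pyGetD_zero] at *
    rw [PySem.List.pyGetD_ofNat' c 1 0]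
    constructor <;> rw [hR, PySem.List.mem_pyRange_one] <;> rw [hgets] <;> omega
  -- the two initial dicts
  have hitemsA0 : (genDictA n).items = R.map (fun k => (k, dfR)) := by
    unfold genDictA; exact items_foldl_insert_const _ _ nodupR
  have hkeysA0 : (genDictA n).keys = R := by
    simp only [PySem.Dict.keys, hitemsA0, List.map_map]; exact map_fst_pair _ R
  have hitemsB0 : ((PySem.List.pyRange 1 (n + 1)).foldl
      (fun d k => d.insert k (0 : Int)) PySem.Dict.empty).items = R.map (fun k => (k, (0 : Int))) := by
    exact items_foldl_insert_const _ _ nodupR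
  have hkeysB0 : ((PySem.List.pyRange 1 (n + 1)).foldl
      (fun d k => d.insert k (0 : Int)) PySem.Dict.empty).keys = R := by
    simp only [PySem.Dict.keys, hitemsB0, List.map_map]; exact map_fst_pair _ R
  have hrel0 : ∀ k, tfD (genDictA n) k = ((PySem.List.pyRange 1 (n + 1)).foldl
      (fun d k => d.insert k (0 : Int)) PySem.Dict.empty).getD k 0 := by
    intro k
    unfold tfD genDictA
    rw [getD_foldl_insert_const, getD_foldl_insert_const]
    split_ifs <;> simp [dfR]
  -- relation after the clause loops
  have rel1 : ∀ k, tfD (cls.foldl (fun d ci =>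
      posCombsA.foldl (fun d cb =>
        if interpretA cb.1 (PySem.List.pyGetD ci 0 0) || interpretA cb.2 (PySem.List.pyGetD ci 1 0) then
          (d.modify |PySem.List.pyGetD ci 0 0| dfR (bumpA cb.1)).modify
            |PySem.List.pyGetD ci 1 0| dfR (bumpA cb.2)
        else d) d) (genDictA n)) k =
      (cls.foldl (fun t c =>
        (t.modify |PySem.List.pyGetD c 0 0| 0 (· + sgnB (PySem.List.pyGetD c 0 0))).modify
          |PySem.List.pyGetD c 1 0| 0 (· + sgnB (PySem.List.pyGetD c 1 0))) ((PySem.List.pyRange 1 (n + 1)).foldl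
            (fun d k => d.insert k (0 : Int)) PySem.Dict.empty)).getD k 0 := by
    intro k; exact loop_rel cls _ _ k (hrel0 k)
  set d1 := cls.foldl (fun d ci =>
      posCombsA.foldl (fun d cb =>
        if interpretA cb.1 (PySem.List.pyGetD ci 0 0) || interpretA cb.2 (PySem.List.pyGetD ci 1 0) then
          (d.modify |PySem.List.pyGetD ci 0 0| dfR (bumpA cb.1)).modify
            |PySem.List.pyGetD ci 1 0| dfR (bumpA cb.2)
        else d) d) (genDictA n) with hd1
  set tally := cls.foldl (fun t c =>
        (t.modify |PySem.List.pyGetD c 0 0| 0 (· + sgnB (PySem.List.pyGetD c 0 0))).modify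
          |PySem.List.pyGetD c 1 0| 0 (· + sgnB (PySem.List.pyGetD c 1 0))) ((PySem.List.pyRange 1 (n + 1)).foldl
            (fun d k => d.insert k (0 : Int)) PySem.Dict.empty) with htally
  have keysA1 : d1.keys = R := by
    rw [hd1, loopA_keys cls _ (by intro c hc; rw [hkeysA0]; exact hmem c hc), hkeysA0]
  have keysB1 : tally.keys = R := by
    rw [htally, loopB_keys cls _ (by intro c hc; rw [hkeysB0]; exact hmem c hc), hkeysB0]
  have nodupB1 : tally.keys.Nodup := by rw [keysB1]; exact nodupR
  -- the "set" pass
  set d2 := d1.keys.foldl (fun d key =>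
      d.modify key dfR (fun r => { r with s := decide (r.f ≤ r.t) })) d1 with hd2
  have keys2 : d2.keys = R := by
    rw [hd2, keys_foldl_modify_of_mem _ _ _ _ (fun x hx => hx), keysA1]
  have sbit : ∀ k ∈ R, (d2.getD k dfR).s = decide (0 ≤ tally.getD k 0) := by
    intro k hk
    rw [hd2, getD_foldl_modify_of_nodup _ _ _ d1 k (by rw [keysA1]; exact nodupR), keysA1,
      if_pos hk]
    have hrel := rel1 k
    simp only [tfD] at hrel
    simp only [decide_eq_decide]
    omega
  -- the assignment dict of B
  set assign := tally.items.foldl (fun d p => d.insert p.1 (decide ((0:Int) ≤ p.2))) PySem.Dict.empty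
    with hassigndef
  have hitems_tally : tally.items = R.map (fun k => (k, tally.getD k 0)) := by
    rw [PySem.Dict.items_eq_map_keys tally nodupB1 0, keysB1]
  have hitems_assign : assign.items = R.map (fun k => (k, decide (0 ≤ tally.getD k 0))) := by
    rw [hassigndef]
    have h := PySem.Dict.items_foldl_insert_fresh tally.items Prod.fst
      (fun p => decide ((0:Int) ≤ p.2)) PySem.Dict.empty (by intro a _; simp)
      (by exact nodupB1)
    rw [h, hitems_tally]
    simp [Function.comp_def, PySem.Dict.empty]
  have hassign : ∀ k ∈ R, assign.getD k false = decide (0 ≤ tally.getD k 0) := by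
    intro k hk
    refine PySem.Dict.getD_of_mem_items assign ?_ ?_ false
    · rw [hitems_assign]
      exact List.mem_map_of_mem hk
    · show assign.keys.Nodup
      have : assign.keys = R := by
        simp only [PySem.Dict.keys, hitems_assign, List.map_map]; exact map_fst_pair _ R
      rw [this]; exact nodupR
  -- the two satisfaction tests agree
  have hcond : ∀ l : Int, |l| ∈ R → getA d2 l = satB assign l := by
    intro l hl
    simp only [getA, satB]
    rw [sbit _ hl, hassign _ hl]
  -- counts agree
  have hcount : cls.foldl (fun c item =>
      if getA d2 (PySem.List.pyGetD item 0 0) || getA d2 (PySem.List.pyGetD item 1 0) then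
        c + 1 else c) (0 : Int) =
    cls.foldl (fun c cl =>
      if satB assign (PySem.List.pyGetD cl 0 0) || satB assign (PySem.List.pyGetD cl 1 0) then
        c + 1 else c) (0 : Int) := by
    apply PySem.List.foldl_congr_mem
    intro acc c hc
    rw [hcond _ (hmem c hc).1, hcond _ (hmem c hc).2]
  -- solution arrays agree
  have harr : d2.keys.map (fun key => if (d2.getD key dfR).s then (1 : Int) else 0) =
      assign.items.map (fun p => if p.2 then (1 : Int) else 0) := by
    rw [keys2, hitems_assign, List.map_map]
    refine List.map_congr_left ?_
    intro k hk
    simp only [Function.comp]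
    rw [sbit _ hk]
  simp only [Prod.mk.injEq]
  exact ⟨harr, hcount⟩
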